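-- pv_equiv track=rewrite | github.com/Dpeska920/ai-ru-text-checker | worker/app/services/diff_service.py | _tokenize_words
-- ===== SOURCE A (Python) =====
-- def _tokenize_words(text: str) -> list[str]:
--     """
--     Split text into words with their trailing whitespace.
--     Better for word-level comparison - keeps words with their spaces.
--     Example: "Hello world" -> ["Hello ", "world"]
--     """
--     tokens = []
--     current = ""
--     for char in text:
--         if char.isspace():
--             current += char
--         else:
--             if current and current[-1].isspace():
--                 tokens.append(current)
--                 current = char
--             else:
--                 current += char
--     if current:
--         tokens.append(current)
--     return tokens if tokens else [text]
-- ===== SOURCE B (Python) =====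
-- def _tokenize_words(text: str) -> list[str]:
--     """Boundary-scan reimplementation: each token is a maximal run of
--     non-whitespace characters together with its trailing whitespace run
--     (a leading whitespace run forms its own token)."""
--     if not text:
--         return [text]
--     tokens = []
--     i = 0
--     n = len(text)
--     while i < n:
--         j = i
--         while j < n and not text[j].isspace():
--             j += 1
--         while j < n and text[j].isspace():
--             j += 1
--         tokens.append(text[i:j])
--         i = j
--     return tokens
-- ===== Notes on version B (the rewrite author's own statement) =====
-- stated objective: alternative
-- what changed: A accumulates a growing `current` string char-by-char with a look-back at its last character; B instead scans run boundaries: it repeatedly advances an index over one non-space run plus its trailing whitespace run and slices that token straight out of the text.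
import Mathlib
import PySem

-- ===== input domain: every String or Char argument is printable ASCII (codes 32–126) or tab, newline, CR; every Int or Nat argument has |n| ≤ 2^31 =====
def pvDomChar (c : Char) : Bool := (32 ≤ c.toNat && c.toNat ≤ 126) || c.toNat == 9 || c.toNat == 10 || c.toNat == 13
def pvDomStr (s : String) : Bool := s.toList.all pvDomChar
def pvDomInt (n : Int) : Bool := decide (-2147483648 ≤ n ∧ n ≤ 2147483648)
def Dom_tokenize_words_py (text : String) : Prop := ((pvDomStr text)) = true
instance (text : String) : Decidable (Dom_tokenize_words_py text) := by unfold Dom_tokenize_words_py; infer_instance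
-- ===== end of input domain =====

-- B replaces A's char-by-char accumulator loop by a boundary scan that slices
-- out one token (non-space run + trailing space run) at a time (objective: alternative).

-- ===== PORT A =====
-- one iteration of A's `for char in text` loop; state = (tokens, current)
def tokAStep (st : List String × List Char) (c : Char) : List String × List Char :=
  if PySem.Chars.isspace c then (st.1, st.2 ++ [c])
  else if st.2.getLast?.any PySem.Chars.isspace then (st.1 ++ [String.ofList st.2], [c])
  else (st.1, st.2 ++ [c])

def tokenize_words_py (text : String) : List String :=
  let st := text.toList.foldl tokAStep ([], [])
  let tokens := if st.2.isEmpty then st.1 else st.1 ++ [String.ofList st.2]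
  if tokens.isEmpty then [text] else tokens

-- ===== PORT B =====
-- Source B's outer while loop: cut off one token = non-space run + following space run
def tokBLoop : List Char → List String
  | [] => []
  | c :: rest =>
    if PySem.Chars.isspace c then
      String.ofList (c :: rest.takeWhile PySem.Chars.isspace)
        :: tokBLoop (rest.dropWhile PySem.Chars.isspace)
    else
      let r1 := rest.dropWhile (fun x => !PySem.Chars.isspace x)
      String.ofList (c :: (rest.takeWhile (fun x => !PySem.Chars.isspace x)
                        ++ r1.takeWhile PySem.Chars.isspace))
        :: tokBLoop (r1.dropWhile PySem.Chars.isspace)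
  termination_by cs => cs.length
  decreasing_by
  · exact Nat.lt_succ_of_le (List.length_dropWhile_le _ _)
  · exact Nat.lt_succ_of_le ((List.length_dropWhile_le _ _).trans (List.length_dropWhile_le _ _))

def tokenize_words_py_alt (text : String) : List String :=
  if text.toList.isEmpty then [text] else tokBLoop text.toList

-- ===== PRECONDITION & SPEC =====
def Spec_tokenize_words_py (text : String) (out : List String) : Prop := out = tokenize_words_py_alt text
instance (text : String) (out : List String) : Decidable (Spec_tokenize_words_py text out) := by unfold Spec_tokenize_words_py; infer_instance

-- ===== CLAIM (what is proved, stated in full; the proofs are below) =====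
def Claim_equal_tokenize_words_py : Prop := ∀ (text : String), Dom_tokenize_words_py text → Spec_tokenize_words_py text (tokenize_words_py text)

-- ===== LEMMAS AND PROOFS =====

-- A's finalization: append the pending `current` if nonempty (defeq to the port's let)
def finA (st : List String × List Char) : List String :=
  if st.2.isEmpty then st.1 else st.1 ++ [String.ofList st.2]

lemma tw_all (q : Char → Bool) (u v : List Char) (h : ∀ c ∈ u, q c = true) :
    (u ++ v).takeWhile q = u ++ v.takeWhile q := by
  induction u with
  | nil => simp
  | cons a u ih =>
    simp [h a (by simp), ih (fun c hc => h c (by simp [hc]))]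

lemma dw_all (q : Char → Bool) (u v : List Char) (h : ∀ c ∈ u, q c = true) :
    (u ++ v).dropWhile q = v.dropWhile q := by
  induction u with
  | nil => simp
  | cons a u ih =>
    simp [h a (by simp), ih (fun c hc => h c (by simp [hc]))]

lemma tw_sp_nil (s : List Char) (hs : ∀ c ∈ s, PySem.Chars.isspace c = true) :
    s.takeWhile (fun x => !PySem.Chars.isspace x) = [] := by
  cases s with
  | nil => rfl
  | cons b s' => simp [hs b (by simp)]

lemma dw_sp_self (s : List Char) (hs : ∀ c ∈ s, PySem.Chars.isspace c = true) :
    s.dropWhile (fun x => !PySem.Chars.isspace x) = s := by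
  cases s with
  | nil => rfl
  | cons b s' => simp [hs b (by simp)]

lemma dw_head_false (q : Char → Bool) : ∀ (l : List Char) (c : Char) (t : List Char),
    l.dropWhile q = c :: t → q c = false := by
  intro l
  induction l with
  | nil => intro c t h; cases h
  | cons a l ih =>
    intro c t h
    by_cases ha : q a
    · exact ih c t (by simpa [List.dropWhile_cons, ha] using h)
    · rw [List.dropWhile_cons, if_neg (by simp [ha])] at h
      cases h
      simpa using ha

lemma getLast_any_false (p : List Char) (h : ∀ c ∈ p, PySem.Chars.isspace c = false) :
    p.getLast?.any PySem.Chars.isspace = false := by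
  cases hp : p.getLast? with
  | none => rfl
  | some a =>
    have ha : a ∈ p := List.mem_of_getLast? hp
    simp [h a ha]

lemma getLast_any_true (u s : List Char) (hs : s ≠ [])
    (h : ∀ c ∈ s, PySem.Chars.isspace c = true) :
    (u ++ s).getLast?.any PySem.Chars.isspace = true := by
  rw [List.getLast?_append_of_ne_nil _ hs]
  cases s with
  | nil => exact absurd rfl hs
  | cons b s' =>
    have hmem : (b :: s').getLast (by simp) ∈ b :: s' := List.getLast_mem _
    rw [List.getLast?_eq_some_getLast (by simp)]
    simp [h _ hmem]

-- A's loop over a run of non-space characters just extends `current`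
lemma foldA_word : ∀ (w : List Char) (toks : List String) (cur : List Char),
    (∀ c ∈ w, PySem.Chars.isspace c = false) →
    cur.getLast?.any PySem.Chars.isspace = false →
    List.foldl tokAStep (toks, cur) w = (toks, cur ++ w) := by
  intro w
  induction w with
  | nil => intro toks cur _ _; simp
  | cons c w ih =>
    intro toks cur hw hcur
    have hc : PySem.Chars.isspace c = false := hw c (by simp)
    have hstep : tokAStep (toks, cur) c = (toks, cur ++ [c]) := by
      simp [tokAStep, hc, hcur]
    rw [List.foldl_cons, hstep,
      ih toks (cur ++ [c]) (fun d hd => hw d (by simp [hd])) (by simp [hc])]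
    simp

-- A's loop over a run of space characters just extends `current`
lemma foldA_space : ∀ (s : List Char) (toks : List String) (cur : List Char),
    (∀ c ∈ s, PySem.Chars.isspace c = true) →
    List.foldl tokAStep (toks, cur) s = (toks, cur ++ s) := by
  intro s
  induction s with
  | nil => intro toks cur _; simp
  | cons c s ih =>
    intro toks cur hs
    have hc : PySem.Chars.isspace c = true := hs c (by simp)
    rw [List.foldl_cons, show tokAStep (toks, cur) c = (toks, cur ++ [c]) from by
      simp [tokAStep, hc], ih toks (cur ++ [c]) (fun d hd => hs d (by simp [hd]))]
    simp

lemma tokB_cons_neg (a : Char) (rest : List Char) (ha : PySem.Chars.isspace a = false) :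
    tokBLoop (a :: rest)
      = String.ofList (a :: (rest.takeWhile (fun x => !PySem.Chars.isspace x)
            ++ (rest.dropWhile (fun x => !PySem.Chars.isspace x)).takeWhile PySem.Chars.isspace))
        :: tokBLoop ((rest.dropWhile (fun x => !PySem.Chars.isspace x)).dropWhile PySem.Chars.isspace) := by
  rw [tokBLoop, if_neg (by simp [ha])]

-- B on a single word+spaces token
lemma tokB_word_space (u s : List Char)
    (hu : ∀ c ∈ u, PySem.Chars.isspace c = false)
    (hs : ∀ c ∈ s, PySem.Chars.isspace c = true)
    (hne : u ++ s ≠ []) :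
    tokBLoop (u ++ s) = [String.ofList (u ++ s)] := by
  cases u with
  | nil =>
    cases s with
    | nil => exact absurd rfl hne
    | cons b s' =>
      have hb : PySem.Chars.isspace b = true := hs b (by simp)
      have hs' : ∀ c ∈ s', PySem.Chars.isspace c = true := fun c hc => hs c (by simp [hc])
      rw [show ([] : List Char) ++ b :: s' = b :: s' from rfl, tokBLoop]
      rw [if_pos hb]
      rw [show s'.takeWhile PySem.Chars.isspace = s' from by
            simpa using tw_all PySem.Chars.isspace s' [] hs',
          show s'.dropWhile PySem.Chars.isspace = [] from by
            simpa using dw_all PySem.Chars.isspace s' [] hs']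
      simp [tokBLoop]
  | cons a u' =>
    have ha : PySem.Chars.isspace a = false := hu a (by simp)
    have hu' : ∀ c ∈ u', PySem.Chars.isspace c = false := fun c hc => hu c (by simp [hc])
    rw [List.cons_append, tokB_cons_neg a (u' ++ s) ha]
    have h1 : (u' ++ s).dropWhile (fun x => !PySem.Chars.isspace x) = s := by
      rw [dw_all _ u' s (fun d hd => by simp [hu' d hd]), dw_sp_self s hs]
    have h2 : (u' ++ s).takeWhile (fun x => !PySem.Chars.isspace x) = u' := by
      rw [tw_all _ u' s (fun d hd => by simp [hu' d hd]), tw_sp_nil s hs]; simp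
    rw [h1, h2,
      show s.takeWhile PySem.Chars.isspace = s from by
        simpa using tw_all PySem.Chars.isspace s [] hs,
      show s.dropWhile PySem.Chars.isspace = [] from by
        simpa using dw_all PySem.Chars.isspace s [] hs]
    simp [tokBLoop]


-- B cuts off exactly one token at a word/space boundary
lemma tokB_step (u s : List Char) (c : Char) (t : List Char)
    (hu : ∀ c ∈ u, PySem.Chars.isspace c = false)
    (hs : ∀ c ∈ s, PySem.Chars.isspace c = true)
    (hsne : s ≠ []) (hc : PySem.Chars.isspace c = false) :
    tokBLoop (u ++ s ++ c :: t) = String.ofList (u ++ s) :: tokBLoop (c :: t) := by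
  obtain ⟨b, s', rfl⟩ : ∃ b s', s = b :: s' := by
    cases s with
    | nil => exact absurd rfl hsne
    | cons b s' => exact ⟨b, s', rfl⟩
  have hb : PySem.Chars.isspace b = true := hs b (by simp)
  have hs' : ∀ d ∈ s', PySem.Chars.isspace d = true := fun d hd => hs d (by simp [hd])
  cases u with
  | nil =>
    rw [show ([] : List Char) ++ b :: s' ++ c :: t = b :: (s' ++ c :: t) from by simp,
      tokBLoop, if_pos hb]
    rw [tw_all PySem.Chars.isspace s' (c :: t) hs',
      dw_all PySem.Chars.isspace s' (c :: t) hs',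
      List.takeWhile_cons, List.dropWhile_cons]
    simp [hc]
  | cons a u' =>
    have ha : PySem.Chars.isspace a = false := hu a (by simp)
    have hu' : ∀ d ∈ u', PySem.Chars.isspace d = false := fun d hd => hu d (by simp [hd])
    rw [show (a :: u') ++ b :: s' ++ c :: t = a :: (u' ++ (b :: s' ++ c :: t)) from by simp,
      tokB_cons_neg a _ ha]
    have h1 : (u' ++ (b :: s' ++ c :: t)).dropWhile (fun x => !PySem.Chars.isspace x)
        = b :: s' ++ c :: t := by
      rw [dw_all _ u' _ (fun d hd => by simp [hu' d hd]), List.cons_append, List.dropWhile_cons]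
      simp [hb]
    have h2 : (u' ++ (b :: s' ++ c :: t)).takeWhile (fun x => !PySem.Chars.isspace x)
        = u' := by
      rw [tw_all _ u' _ (fun d hd => by simp [hu' d hd]), List.cons_append, List.takeWhile_cons]
      simp [hb]
    rw [h1, h2]
    rw [show (b :: s' ++ c :: t).takeWhile PySem.Chars.isspace = b :: s' from by
      rw [List.cons_append, List.takeWhile_cons, if_pos hb,
        tw_all PySem.Chars.isspace s' (c :: t) hs', List.takeWhile_cons]
      simp [hc]]
    rw [show (b :: s' ++ c :: t).dropWhile PySem.Chars.isspace = c :: t from by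
      rw [List.cons_append, List.dropWhile_cons, if_pos hb,
        dw_all PySem.Chars.isspace s' (c :: t) hs', List.dropWhile_cons]
      simp [hc]]
    simp

lemma tokB_ne_nil (a : Char) (l : List Char) : tokBLoop (a :: l) ≠ [] := by
  rw [tokBLoop]
  split <;> simp

-- MAIN INVARIANT: A's loop from state (toks, p) with p a pending non-space run
-- finalizes to toks followed by B's tokens of p ++ cs
lemma foldA_main : ∀ (n : Nat) (cs p : List Char) (toks : List String),
    cs.length ≤ n → (∀ c ∈ p, PySem.Chars.isspace c = false) →
    finA (List.foldl tokAStep (toks, p) cs) = toks ++ tokBLoop (p ++ cs) := by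
  intro n
  induction n with
  | zero =>
    intro cs p toks hlen hp
    have hcs : cs = [] := List.eq_nil_of_length_eq_zero (Nat.le_zero.mp hlen)
    subst hcs
    cases p with
    | nil => simp [finA, tokBLoop]
    | cons a p' =>
      rw [List.foldl_nil, List.append_nil,
        show tokBLoop (a :: p') = [String.ofList (a :: p')] from by
          simpa using tokB_word_space (a :: p') [] hp (by simp) (by simp)]
      simp [finA]
  | succ n ih =>
    intro cs p toks hlen hp
    cases cs with
    | nil =>
      cases p with
      | nil => simp [finA, tokBLoop]
      | cons a p' =>
        rw [List.foldl_nil, List.append_nil,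
          show tokBLoop (a :: p') = [String.ofList (a :: p')] from by
            simpa using tokB_word_space (a :: p') [] hp (by simp) (by simp)]
        simp [finA]
    | cons a cs' =>
      -- decompose a :: cs' into word run, space run, and the rest
      set w := (a :: cs').takeWhile (fun x => !PySem.Chars.isspace x) with hw_def
      set r1 := (a :: cs').dropWhile (fun x => !PySem.Chars.isspace x) with hr1_def
      set s := r1.takeWhile PySem.Chars.isspace with hs_def
      set r2 := r1.dropWhile PySem.Chars.isspace with hr2_def
      have hw : ∀ c ∈ w, PySem.Chars.isspace c = false := by
        intro c hc
        have := List.mem_takeWhile_imp hc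
        simpa using this
      have hs : ∀ c ∈ s, PySem.Chars.isspace c = true := by
        intro c hc
        exact List.mem_takeWhile_imp hc
      have hsplit : w ++ (s ++ r2) = a :: cs' := by
        rw [hs_def, hr2_def, List.takeWhile_append_dropWhile,
          hw_def, hr1_def, List.takeWhile_append_dropWhile]
      have hfold : List.foldl tokAStep (toks, p) (a :: cs')
          = List.foldl tokAStep (toks, (p ++ w) ++ s) r2 := by
        conv_lhs => rw [← hsplit]
        rw [List.foldl_append, List.foldl_append,
          foldA_word w toks p hw (getLast_any_false p hp),
          foldA_space s toks (p ++ w) hs]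
      have hpw : ∀ c ∈ p ++ w, PySem.Chars.isspace c = false := by
        intro c hc
        rcases List.mem_append.mp hc with h | h
        · exact hp c h
        · exact hw c h
      cases hr2 : r2 with
      | nil =>
        rw [hfold, hr2, List.foldl_nil]
        have hne : w ++ s ≠ [] := by
          intro h
          have : w ++ (s ++ r2) = [] := by simp [hr2, h]
          rw [hsplit] at this; cases this
        rw [show p ++ a :: cs' = (p ++ w) ++ s from by
            rw [← hsplit, hr2, List.append_nil, List.append_assoc],
          tokB_word_space (p ++ w) s hpw hs (by
            intro h
            rcases List.append_eq_nil_iff.mp h with ⟨h1, h2⟩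
            rcases List.append_eq_nil_iff.mp h1 with ⟨_, h3⟩
            exact hne (by simp [h3, h2]))]
        have : (p ++ w) ++ s ≠ [] := by
          intro h
          rcases List.append_eq_nil_iff.mp h with ⟨h1, h2⟩
          rcases List.append_eq_nil_iff.mp h1 with ⟨_, h3⟩
          exact hne (by simp [h3, h2])
        simp [finA, List.isEmpty_iff, List.append_assoc]
        intro _ hw0 hs0
        exact hne (by simp [hw0, hs0])
      | cons c r2' =>
        have hc : PySem.Chars.isspace c = false :=
          dw_head_false _ r1 c r2' (by rw [← hr2_def, hr2])
        have hsne : s ≠ [] := by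
          intro h
          have hr1 : r1 = c :: r2' := by
            have : r1 = s ++ r2 := by rw [hs_def, hr2_def, List.takeWhile_append_dropWhile]
            rw [this, h, hr2]; rfl
          have : (fun x => !PySem.Chars.isspace x) c = false :=
            dw_head_false _ (a :: cs') c r2' (by rw [← hr1_def, hr1])
          simp [hc] at this
        have hstep : tokAStep (toks, (p ++ w) ++ s) c
            = (toks ++ [String.ofList ((p ++ w) ++ s)], [c]) := by
          have hlast := getLast_any_true (p ++ w) s hsne hs
          simp only [tokAStep]
          rw [if_neg (show ¬(PySem.Chars.isspace c = true) by simp [hc]), if_pos hlast]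
        have hlen' : r2'.length ≤ n := by
          have hL := congrArg List.length hsplit
          simp [hr2, List.length_append, List.length_cons] at hL
          simp only [List.length_cons] at hlen
          omega
        rw [hfold, hr2, List.foldl_cons, hstep,
          ih r2' [c] (toks ++ [String.ofList ((p ++ w) ++ s)]) hlen'
            (by intro d hd; rw [List.mem_singleton] at hd; rw [hd]; exact hc)]
        rw [show p ++ a :: cs' = (p ++ w) ++ s ++ c :: r2' from by
          rw [← hsplit, hr2]; simp [List.append_assoc]]
        rw [tokB_step (p ++ w) s c r2' hpw hs hsne hc]
        simp

-- ===== VERDICT (by name: the statement is the Claim_ definition above) =====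
theorem tokenize_words_py_spec : Claim_equal_tokenize_words_py := by
  intro text _
  unfold Spec_tokenize_words_py tokenize_words_py tokenize_words_py_alt
  cases htl : text.toList with
  | nil => simp
  | cons a l =>
    have hmain := foldA_main (a :: l).length (a :: l) [] [] (le_refl _) (by simp)
    simp only [List.nil_append] at hmain
    show (if (finA ((a :: l).foldl tokAStep ([], []))).isEmpty then [text]
          else finA ((a :: l).foldl tokAStep ([], []))) =
        if (a :: l).isEmpty then [text] else tokBLoop (a :: l)
    rw [hmain]
    simp [List.isEmpty_iff, tokB_ne_nil a l]
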